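-- pv_equiv track=rewrite | github.com/ajendergajarla/git-aug9 | a24.py | ab
-- ===== SOURCE A (Python) =====
-- import math
--
-- def ab(A,B,C):
--     if A==B: return C
--     else:
--         if A>B:
--             t=math.ceil(A/2)
--             C+=t
--             return ab(A-t,B,C)
--
--         else:
--             t=math.ceil(B/2)
--             C+=t
--             return ab(A,B-t,C)
-- ===== SOURCE B (Python) =====
-- def ab(A, B, C):
--     # Closed form: the halving process meets at the longest common binary
--     # prefix of A and B; the total added to C is (A - f) + (B - f).
--     if A == B:
--         return C
--     a, b = A, B
--     if a.bit_length() > b.bit_length():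
--         a >>= a.bit_length() - b.bit_length()
--     elif b.bit_length() > a.bit_length():
--         b >>= b.bit_length() - a.bit_length()
--     f = a >> (a ^ b).bit_length()
--     return C + (A - f) + (B - f)
-- ===== Notes on version B (the rewrite author's own statement) =====
-- stated objective: alternative
-- what changed: Replaces A's step-by-step halving recursion (one ceil-halving of the larger value per step, accumulating into C) by a closed form: the process meets at the longest common binary prefix of A and B, computed with bit_length/xor/shift, and the answer is C + (A - f) + (B - f).
import Mathlib
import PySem

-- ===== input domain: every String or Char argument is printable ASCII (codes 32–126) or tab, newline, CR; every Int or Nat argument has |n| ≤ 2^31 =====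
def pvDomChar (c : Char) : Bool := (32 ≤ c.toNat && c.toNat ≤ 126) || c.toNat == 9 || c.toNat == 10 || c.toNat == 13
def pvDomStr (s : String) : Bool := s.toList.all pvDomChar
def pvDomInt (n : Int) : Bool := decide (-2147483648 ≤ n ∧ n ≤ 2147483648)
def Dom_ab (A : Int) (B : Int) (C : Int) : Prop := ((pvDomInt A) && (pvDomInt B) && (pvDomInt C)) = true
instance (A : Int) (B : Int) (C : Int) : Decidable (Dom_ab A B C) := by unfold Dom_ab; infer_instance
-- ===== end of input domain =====

-- B replaces A's step-by-step halving recursion by a closed form: the process meets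
-- at the longest common binary prefix of A and B (bit_length/xor/shift); objective: alternative.

-- ===== PORT A =====
-- A's recursion does not terminate for all Int inputs (see Pre_ab), so the port
-- carries a fuel counter; the wrapper supplies fuel that provably suffices on Pre_ab
-- (each step shrinks the larger argument, so natAbs A + natAbs B + 1 steps are enough).
-- math.ceil(x/2) on an int |x| ≤ 2^31 is exact (x/2 is an exact float), and equals
-- the ceiling division -((-x) // 2), ported with PySem.Int.floordiv.
def abFuel : Nat → Int → Int → Int → Int
  | 0, _, _, C => C
  | n+1, A, B, C =>
    if A = B then C
    else
      if A > B then
        let t := -(PySem.Int.floordiv (-A) 2)   -- t = math.ceil(A/2)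
        abFuel n (A - t) B (C + t)
      else
        let t := -(PySem.Int.floordiv (-B) 2)   -- t = math.ceil(B/2)
        abFuel n A (B - t) (C + t)

def ab (A : Int) (B : Int) (C : Int) : Int := abFuel (A.natAbs + B.natAbs + 1) A B C

-- ===== PORT B =====
-- literal port of Source B; Python's n.bit_length(), n >> k, a ^ b are
-- PySem.Int.bitLength, >>> and PySem.Int.bxor (Python-exact, per PYSEM.md).
def ab_alt (A : Int) (B : Int) (C : Int) : Int :=
  if A = B then C
  else
    let a :=
      if PySem.Int.bitLength A > PySem.Int.bitLength B then
        A >>> (PySem.Int.bitLength A - PySem.Int.bitLength B)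
      else A
    let b :=
      if PySem.Int.bitLength B > PySem.Int.bitLength A then
        B >>> (PySem.Int.bitLength B - PySem.Int.bitLength A)
      else B
    let f := a >>> PySem.Int.bitLength (PySem.Int.bxor a b)
    C + (A - f) + (B - f)

-- ===== PRECONDITION & SPEC =====
-- Pre_ab is exactly where the Python A returns: if A ≠ B and either argument is
-- negative, the repeated halving of the larger value never reaches the other one
-- (halving drives values towards 0, resp. -1) and A hits RecursionError.
def Pre_ab (A : Int) (B : Int) (C : Int) : Prop := A = B ∨ (0 ≤ A ∧ 0 ≤ B)
instance (A : Int) (B : Int) (C : Int) : Decidable (Pre_ab A B C) := by unfold Pre_ab; infer_instance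
def pvWitness_ab : Int × Int × Int := (10, 4, 0)

def Spec_ab (A : Int) (B : Int) (C : Int) (out : Int) : Prop := out = ab_alt A B C
instance (A : Int) (B : Int) (C : Int) (out : Int) : Decidable (Spec_ab A B C out) := by unfold Spec_ab; infer_instance

-- ===== CLAIM (what is proved, stated in full; the proofs are below) =====
def Claim_equal_ab : Prop := ∀ (A : Int) (B : Int) (C : Int), Dom_ab A B C → Pre_ab A B C → Spec_ab A B C (ab A B C)

-- ===== LEMMAS AND PROOFS =====

-- the value at which the halving process of A stops, on Nat
def meet (a b : Nat) : Nat :=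
  if h : a = b then a
  else if hlt : b < a then meet (a / 2) b else meet a (b / 2)
termination_by a + b
decreasing_by
  · have : 0 < a := by omega
    have : a / 2 < a := Nat.div_lt_self this (by omega)
    omega
  · have : 0 < b := by omega
    have : b / 2 < b := Nat.div_lt_self (by omega) (by omega)
    omega

-- Python bit_length on a Nat
def blN (m : Nat) : Nat := PySem.Int.bitLength (Int.ofNat m)

theorem blN_zero : blN 0 = 0 := by decide

theorem blN_succ (m : Nat) (h : 0 < m) : blN m = blN (m / 2) + 1 := by
  unfold blN
  exact PySem.Int.bitLength_natCast h

theorem blN_pos (m : Nat) (h : 0 < m) : 0 < blN m := by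
  rw [blN_succ m h]; omega

theorem blN_eq_zero (m : Nat) (h : blN m = 0) : m = 0 := by
  by_contra hm
  have := blN_pos m (by omega)
  omega

theorem lt_two_pow_blN (m : Nat) : m < 2 ^ blN m := by
  have := PySem.Int.lt_two_pow_bitLength (Int.ofNat m)
  simpa [blN] using this

theorem two_pow_le_blN (m : Nat) (h : m ≠ 0) : 2 ^ (blN m - 1) ≤ m := by
  have := PySem.Int.two_pow_bitLength_le (Int.ofNat m) (by simpa using h)
  simpa [blN] using this

theorem lt_of_blN_lt (a b : Nat) (h : blN b < blN a) : b < a := by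
  have ha : a ≠ 0 := by
    intro h0; rw [h0, blN_zero] at h; omega
  have h1 : b < 2 ^ blN b := lt_two_pow_blN b
  have h2 : 2 ^ (blN a - 1) ≤ a := two_pow_le_blN a ha
  have h3 : (2:Nat) ^ blN b ≤ 2 ^ (blN a - 1) := Nat.pow_le_pow_right (by omega) (by omega)
  omega

theorem meet_self (a : Nat) : meet a a = a := by
  unfold meet; simp

theorem meet_left (a b : Nat) (h : b < a) : meet a b = meet (a / 2) b := by
  conv_lhs => rw [meet]
  simp [Nat.ne_of_gt h, h]

theorem meet_right (a b : Nat) (h : a < b) : meet a b = meet a (b / 2) := by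
  conv_lhs => rw [meet]
  simp [Nat.ne_of_lt h, Nat.lt_asymm h]

theorem blN_div2 (a : Nat) (h : 0 < a) : blN (a / 2) = blN a - 1 := by
  rw [blN_succ a h]; omega

theorem meet_comm (a b : Nat) : meet a b = meet b a := by
  have main : ∀ n, ∀ a b : Nat, a + b ≤ n → meet a b = meet b a := by
    intro n
    induction n with
    | zero =>
      intro a b hab
      have ha : a = 0 := by omega
      have hb : b = 0 := by omega
      subst ha; subst hb; rfl
    | succ n ih =>
      intro a b hab
      by_cases h1 : a = b
      · subst h1; rfl
      · by_cases h2 : b < a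
        · have ha : 0 < a := by omega
          have : a / 2 < a := Nat.div_lt_self ha (by omega)
          rw [meet_left a b h2, meet_right b a h2, ih (a / 2) b (by omega)]
        · have h3 : a < b := by omega
          have hb : 0 < b := by omega
          have : b / 2 < b := Nat.div_lt_self hb (by omega)
          rw [meet_right a b h3, meet_left b a h3, ih a (b / 2) (by omega)]
  exact main (a + b) a b (by omega)

-- aligning the longer argument: k halvings of the bigger one
theorem meet_align (k : Nat) : ∀ a b : Nat, blN a = blN b + k → meet a b = meet (a >>> k) b := by
  induction k with
  | zero => intro a b _; simp
  | succ k ih =>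
    intro a b h
    have hlt : blN b < blN a := by omega
    have hba : b < a := lt_of_blN_lt a b hlt
    have ha : 0 < a := by omega
    rw [meet_left a b hba]
    rw [ih (a / 2) b (by rw [blN_div2 a ha]; omega)]
    rw [Nat.shiftRight_succ_inside]

theorem blN_shiftRight (k : Nat) : ∀ a : Nat, k ≤ blN a → blN (a >>> k) = blN a - k := by
  induction k with
  | zero => intro a _; simp
  | succ k ih =>
    intro a h
    have ha : 0 < a := by
      by_contra h0
      have : a = 0 := by omega
      rw [this, blN_zero] at h; omega
    rw [Nat.shiftRight_succ_inside, ih (a / 2) (by rw [blN_div2 a ha]; omega), blN_div2 a ha]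
    omega

-- equal bit lengths: the meeting point is the common binary prefix
theorem meet_prefix : ∀ a b : Nat, blN a = blN b → meet a b = a >>> blN (a ^^^ b) := by
  have main : ∀ n, ∀ a b : Nat, a + b ≤ n → blN a = blN b → meet a b = a >>> blN (a ^^^ b) := by
    intro n
    induction n with
    | zero =>
      intro a b hab _
      have ha : a = 0 := by omega
      have hb : b = 0 := by omega
      subst ha; subst hb
      simp [meet_self, blN_zero]
    | succ n ih =>
      intro a b hab hbl
      by_cases heq : a = b
      · subst heq
        simp [meet_self, Nat.xor_self, blN_zero]
      · have ha : 0 < a := by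
          rcases Nat.eq_zero_or_pos a with h0 | h
          · exfalso; apply heq
            rw [h0, blN_zero] at hbl
            rw [h0, (blN_eq_zero b hbl.symm)]
          · exact h
        have hb : 0 < b := by
          rcases Nat.eq_zero_or_pos b with h0 | h
          · exfalso; apply heq
            rw [h0, blN_zero] at hbl
            rw [h0, (blN_eq_zero a hbl)]
          · exact h
        have hs : 0 < blN a := blN_pos a ha
        -- one halving on each side
        have step : meet a b = meet (a / 2) (b / 2) := by
          rcases Nat.lt_or_ge b a with hba | hab2
          · rw [meet_left a b hba]
            have h1 : a / 2 < b := by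
              have h2 : a < 2 ^ blN a := lt_two_pow_blN a
              have h3 : 2 ^ (blN b - 1) ≤ b := two_pow_le_blN b (by omega)
              have h4 : a / 2 < 2 ^ (blN a - 1) := by
                have : (2:Nat) ^ blN a = 2 ^ (blN a - 1) * 2 := by
                  rw [← Nat.pow_succ]; congr 1; omega
                omega
              have h5 : (2:Nat) ^ (blN a - 1) ≤ 2 ^ (blN b - 1) := by rw [hbl]
              omega
            exact meet_right (a / 2) b h1
          · have hab3 : a < b := by omega
            rw [meet_right a b hab3]
            have h1 : b / 2 < a := by
              have h2 : b < 2 ^ blN b := lt_two_pow_blN b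
              have h3 : 2 ^ (blN a - 1) ≤ a := two_pow_le_blN a (by omega)
              have h4 : b / 2 < 2 ^ (blN b - 1) := by
                have : (2:Nat) ^ blN b = 2 ^ (blN b - 1) * 2 := by
                  rw [← Nat.pow_succ]; congr 1; omega
                omega
              have h5 : (2:Nat) ^ (blN b - 1) ≤ 2 ^ (blN a - 1) := by rw [hbl]
              omega
            exact meet_left a (b / 2) h1
        have hxne : a ^^^ b ≠ 0 := fun h => heq (Nat.xor_eq_zero_iff.mp h)
        have hd : 0 < blN (a ^^^ b) := blN_pos _ (by omega)
        have hbl2 : blN (a / 2) = blN (b / 2) := by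
          rw [blN_div2 a ha, blN_div2 b hb, hbl]
        have hsum : a / 2 + b / 2 ≤ n := by
          have : a / 2 < a := Nat.div_lt_self ha (by omega)
          have : b / 2 ≤ b := Nat.div_le_self b 2
          omega
        rw [step, ih (a / 2) (b / 2) hsum hbl2, ← Nat.xor_div_two,
          blN_div2 (a ^^^ b) (by omega)]
        have hd1 : blN (a ^^^ b) = (blN (a ^^^ b) - 1) + 1 := by omega
        conv_rhs => rw [hd1, Nat.shiftRight_succ_inside]
  intro a b hbl
  exact main (a + b) a b (by omega) hbl

-- A's ceiling step, written on the toNat level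
theorem ceil_step (A : Int) (h : 0 < A) :
    -(PySem.Int.floordiv (-A) 2) = A - ((A.toNat / 2 : Nat) : Int) := by
  rw [PySem.Int.neg_floordiv_neg_eq_iff_of_pos (by norm_num : (0:Int) < 2)]
  have hA : (A.toNat : Int) = A := Int.toNat_of_nonneg (by omega)
  have h2 : (((A.toNat / 2 : Nat) : Int)) * 2 ≤ (A.toNat : Int) ∧
      (A.toNat : Int) < (((A.toNat / 2 : Nat) : Int) + 1) * 2 := by
    constructor <;> · push_cast; omega
  constructor <;> omega

-- the fuelled recursion computes the closed form whenever the fuel exceeds a + b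
theorem abFuel_eq (n : Nat) : ∀ A B C : Int, 0 ≤ A → 0 ≤ B → A.toNat + B.toNat < n →
    abFuel n A B C = C + (A - ((meet A.toNat B.toNat : Nat) : Int))
      + (B - ((meet A.toNat B.toNat : Nat) : Int)) := by
  induction n with
  | zero => intro A B C _ _ h; omega
  | succ n ih =>
    intro A B C hA hB hfuel
    by_cases heq : A = B
    · subst heq
      simp [abFuel, meet_self, Int.toNat_of_nonneg hA]
    · rw [abFuel]
      simp only [heq, if_false]
      have hAeq : ((A.toNat : Int)) = A := Int.toNat_of_nonneg hA
      have hBeq : ((B.toNat : Int)) = B := Int.toNat_of_nonneg hB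
      by_cases hgt : A > B
      · simp only [hgt, if_true]
        have hApos : 0 < A := by omega
        rw [ceil_step A hApos]
        have hstep : A - (A - ((A.toNat / 2 : Nat) : Int)) = ((A.toNat / 2 : Nat) : Int) := by omega
        rw [hstep]
        have hA2 : (0:Int) ≤ ((A.toNat / 2 : Nat) : Int) := by positivity
        have htoNat : (((A.toNat / 2 : Nat) : Int)).toNat = A.toNat / 2 :=
          Int.toNat_natCast _
        have hdlt : A.toNat / 2 < A.toNat := Nat.div_lt_self (by omega) (by omega)
        rw [ih _ B _ hA2 hB (by rw [htoNat]; omega), htoNat]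
        have hm : meet (A.toNat / 2) B.toNat = meet A.toNat B.toNat :=
          (meet_left A.toNat B.toNat (by omega)).symm
        rw [hm]
        have hle : ((A.toNat / 2 : Nat) : Int) ≤ A := by
          calc ((A.toNat / 2 : Nat) : Int) ≤ ((A.toNat : Nat) : Int) := by exact_mod_cast Nat.div_le_self _ _
          _ = A := hAeq
        omega
      · simp only [hgt, if_false]
        have hBpos : 0 < B := by omega
        rw [ceil_step B hBpos]
        have hstep : B - (B - ((B.toNat / 2 : Nat) : Int)) = ((B.toNat / 2 : Nat) : Int) := by omega
        rw [hstep]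
        have hB2 : (0:Int) ≤ ((B.toNat / 2 : Nat) : Int) := by positivity
        have htoNat : (((B.toNat / 2 : Nat) : Int)).toNat = B.toNat / 2 :=
          Int.toNat_natCast _
        have hdlt : B.toNat / 2 < B.toNat := Nat.div_lt_self (by omega) (by omega)
        rw [ih A _ _ hA hB2 (by rw [htoNat]; omega), htoNat]
        have hm : meet A.toNat (B.toNat / 2) = meet A.toNat B.toNat := by
          have hab : A < B := by omega
          exact (meet_right A.toNat B.toNat (by omega)).symm
        rw [hm]
        omega

-- ===== VERDICT (by name: the statement is the Claim_ definition above) =====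
theorem ab_spec : Claim_equal_ab := by
  intro A B C _ hpre
  unfold Spec_ab ab ab_alt
  by_cases heq : A = B
  · subst heq
    simp [abFuel]
  · rcases hpre with heq' | ⟨hA, hB⟩
    · exact absurd heq' heq
    simp only [heq, if_false]
    set a := A.toNat with ha
    set b := B.toNat with hb
    have hAeq : ((a : Nat) : Int) = A := Int.toNat_of_nonneg hA
    have hBeq : ((b : Nat) : Int) = B := Int.toNat_of_nonneg hB
    have hfuel : a + b < A.natAbs + B.natAbs + 1 := by
      have : A.natAbs = a := by omega
      have : B.natAbs = b := by omega
      omega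
    rw [abFuel_eq _ A B C hA hB hfuel]
    -- identify B's bit computations with blN on a, b
    have hblA : PySem.Int.bitLength A = blN a := by rw [← hAeq]; rfl
    have hblB : PySem.Int.bitLength B = blN b := by rw [← hBeq]; rfl
    have hshift : ∀ (m k : Nat), ((m : Int) >>> k) = ((m >>> k : Nat) : Int) := by
      intro m k; simp [Int.natCast_shiftRight]
    have hxor : ∀ (m n : Nat), PySem.Int.bxor (m : Int) (n : Int) = ((m ^^^ n : Nat) : Int) :=
      PySem.Int.bxor_natCast
    -- show B's f equals the meet
    have hmain : ∀ (a' b' : Nat), blN a' = blN b' →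
        ((a' : Int) >>> PySem.Int.bitLength (PySem.Int.bxor (a' : Int) (b' : Int)))
          = ((meet a' b' : Nat) : Int) := by
      intro a' b' hbl
      rw [hxor, hshift]
      have : PySem.Int.bitLength ((a' ^^^ b' : Nat) : Int) = blN (a' ^^^ b') := rfl
      rw [this, meet_prefix a' b' hbl]
    simp only [hblA, hblB]
    rcases Nat.lt_trichotomy (blN a) (blN b) with hlt | hEq | hgt
    · -- b is longer: align b
      simp only [if_neg (by omega : ¬ blN a > blN b), if_pos hlt]
      rw [← hBeq, hshift]
      have hbl' : blN a = blN (b >>> (blN b - blN a)) := by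
        rw [blN_shiftRight (blN b - blN a) b (by omega)]; omega
      rw [← hAeq, hmain a (b >>> (blN b - blN a)) hbl']
      have hmm : meet a (b >>> (blN b - blN a)) = meet a b := by
        rw [meet_comm a (b >>> (blN b - blN a)), ← meet_align (blN b - blN a) b a (by omega),
          meet_comm b a]
      rw [hmm, hAeq, hBeq]
    · simp only [if_neg (by omega : ¬ blN a > blN b), if_neg (by omega : ¬ blN b > blN a)]
      rw [← hAeq, ← hBeq, hmain a b hEq, hAeq, hBeq]
    · simp only [if_pos hgt, if_neg (by omega : ¬ blN b > blN a)]
      rw [← hAeq, hshift]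
      have hbl' : blN (a >>> (blN a - blN b)) = blN b := by
        rw [blN_shiftRight (blN a - blN b) a (by omega)]; omega
      rw [← hBeq, hmain (a >>> (blN a - blN b)) b hbl']
      have hmm : meet (a >>> (blN a - blN b)) b = meet a b :=
        (meet_align (blN a - blN b) a b (by omega)).symm
      rw [hmm, hAeq, hBeq]
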